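-- pv_equiv track=rewrite | github.com/s-hisham-gh/AI-Fundamentals | task1/p7.py | better_board
-- ===== SOURCE A (Python) =====
-- def position_cost(nqueens):
--     cost = 0
--     for i in range(len(nqueens)):
--         for j in range(i+1, len(nqueens)):
--             if (nqueens[i][0] == nqueens[j][0] or nqueens[i][1] == nqueens[j][1] or
--                 abs(nqueens[i][0]-nqueens[j][0]) == abs(nqueens[i][1]-nqueens[j][1])):
--                 cost += 1
--     return cost
--
-- def number_of_attacks(problem):
--     board = []
--     for i in range(8):
--         rows = []
--         for j in range(8):
--             rows.append(0)
--         board.append(rows)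
--
--     for x in range(0, 8, 1):
--         for y in range(0, 8, 1):
--             board[y][x] = position_cost(problem[:x]+[(y, x)]+problem[x+1:])
--     return board
--
-- def better_board(problem):
--     board_attacks = number_of_attacks(problem)
--     min_attacks = float('inf')
--     best_position = None
--
--     for i in range(8):
--         for j in range(8):
--             if board_attacks[j][i] < min_attacks:
--                 min_attacks = board_attacks[j][i]
--                 best_position = (j, i)
--     if best_position:
--         j, i = best_position
--         problem = problem[:i]+[(j, i)]+problem[i+1:]
--         solution = []
--         for row in range(8):
--             current_row = []
--             for col in range(8):
--                 if (row, col) in problem: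
--                     current_row.append('q')
--                 else:
--                     current_row.append('.')
--             solution.append(current_row)
--
--         output = ''
--         for row in solution:
--             output += ' '.join(row)+'\n'
--         return output.strip()
-- ===== SOURCE B (Python) =====
-- def better_board(problem):
--     # Incremental cost scan: per column, count conflicts among the other queens once,
--     # then add only the new queen's conflicts per row; no 8x8 cost table is built.
--     best = None  # (cost, row, col), updated on strict '<' in column-major order
--     for x in range(8):
--         others = problem[:x] + problem[x+1:]
--         base = _pair_conflicts(others)
--         for y in range(8):
--             cost = base + sum(_attacks((y, x), q) for q in others)
--             if best is None or cost < best[0]: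
--                 best = (cost, y, x)
--     _, j, i = best
--     queens = problem[:i] + [(j, i)] + problem[i+1:]
--     return '\n'.join(
--         ' '.join('q' if (r, c) in queens else '.' for c in range(8))
--         for r in range(8))
--
-- def _attacks(p, q):
--     return p[0] == q[0] or p[1] == q[1] or abs(p[0] - q[0]) == abs(p[1] - q[1])
--
-- def _pair_conflicts(qs):
--     if not qs:
--         return 0
--     head, rest = qs[0], qs[1:]
--     return sum(_attacks(head, r) for r in rest) + _pair_conflicts(rest)
-- ===== Notes on version B (the rewrite author's own statement) =====
-- stated objective: faster
-- what changed: B drops A's 8x8 cost table: instead of recomputing the full O(n^2) pairwise-attack count for each of the 64 candidate cells, B counts the conflicts among the other queens once per column and adds only the new queen's conflicts per row, tracking the column-major strict minimum on the fly; the board is rendered by joining rows instead of concatenate-then-strip.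
import Mathlib
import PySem

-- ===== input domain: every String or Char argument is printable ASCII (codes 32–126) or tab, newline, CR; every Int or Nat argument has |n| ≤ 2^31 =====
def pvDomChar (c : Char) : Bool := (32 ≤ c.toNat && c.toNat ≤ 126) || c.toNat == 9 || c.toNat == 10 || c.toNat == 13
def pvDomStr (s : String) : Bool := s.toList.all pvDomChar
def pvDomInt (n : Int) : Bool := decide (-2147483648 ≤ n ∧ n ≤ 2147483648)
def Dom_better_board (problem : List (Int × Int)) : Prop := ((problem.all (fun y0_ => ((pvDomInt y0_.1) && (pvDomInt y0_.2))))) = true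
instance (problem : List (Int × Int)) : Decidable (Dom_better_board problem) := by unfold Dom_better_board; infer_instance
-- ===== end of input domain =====

-- B replaces A's 64 full pair-cost recomputations (one per board cell) by one
-- pair-conflict count per column plus a per-row incremental count; objective: faster.

-- ===== PORT A =====
-- position_cost: double index loop over all pairs i < j (indices from range(len) are
-- always in range, so the pyGetD default (0,0) is never read)
def pvPositionCost (nqueens : List (Int × Int)) : Int :=
  (PySem.List.pyRange 0 (nqueens.length : Int) 1).foldl (fun cost i =>
    (PySem.List.pyRange (i + 1) (nqueens.length : Int) 1).foldl (fun cost j =>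
      if (PySem.List.pyGetD nqueens i (0, 0)).1 == (PySem.List.pyGetD nqueens j (0, 0)).1 ||
         (PySem.List.pyGetD nqueens i (0, 0)).2 == (PySem.List.pyGetD nqueens j (0, 0)).2 ||
         (((PySem.List.pyGetD nqueens i (0, 0)).1 - (PySem.List.pyGetD nqueens j (0, 0)).1).natAbs ==
          ((PySem.List.pyGetD nqueens i (0, 0)).2 - (PySem.List.pyGetD nqueens j (0, 0)).2).natAbs)
      then cost + 1 else cost) cost) 0

-- number_of_attacks: build the 8x8 zero board by appends, then assign every cell
-- board[y][x] (y, x are always in range 0..7, so pySetD/pyGetD are exact here)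
def pvNumberOfAttacks (problem : List (Int × Int)) : List (List Int) :=
  let board := (PySem.List.pyRange 0 8 1).foldl (fun b _ =>
      b ++ [(PySem.List.pyRange 0 8 1).foldl (fun r _ => r ++ [(0 : Int)]) []]) []
  (PySem.List.pyRange 0 8 1).foldl (fun board x =>
    (PySem.List.pyRange 0 8 1).foldl (fun board y =>
      PySem.List.pySetD board y
        (PySem.List.pySetD (PySem.List.pyGetD board y []) x
          (pvPositionCost (PySem.List.slice problem none (some x) ++ [(y, x)] ++
                           PySem.List.slice problem (some (x + 1)) none)))) board) board

-- float('inf') / min_attacks is modelled as Option Int (none = inf); best_position is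
-- None or a pair, and a pair is always truthy in Python, so `if best_position:` is the
-- `some`/`none` match below
def better_board (problem : List (Int × Int)) : Option String :=
  let board_attacks := pvNumberOfAttacks problem
  let st := (PySem.List.pyRange 0 8 1).foldl (fun st i =>
    (PySem.List.pyRange 0 8 1).foldl (fun st j =>
      let c := PySem.List.pyGetD (PySem.List.pyGetD board_attacks j []) i 0
      if (match st.1 with | none => true | some m => c < m)
      then (some c, some (j, i)) else st) st)
    ((none : Option Int), (none : Option (Int × Int)))
  match st.2 with
  | none => none
  | some (j, i) =>
    let problem := PySem.List.slice problem none (some i) ++ [(j, i)] ++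
                   PySem.List.slice problem (some (i + 1)) none
    let solution := (PySem.List.pyRange 0 8 1).foldl (fun sol row =>
      sol ++ [(PySem.List.pyRange 0 8 1).foldl (fun cur col =>
        cur ++ [if (row, col) ∈ problem then "q" else "."]) []]) []
    let output := solution.foldl (fun out row => out ++ PySem.Str.join " " row ++ "\n") ""
    some (PySem.Str.strip output)

-- ===== PORT B =====
def pvAtkB (p q : Int × Int) : Bool :=
  p.1 == q.1 || p.2 == q.2 || ((p.1 - q.1).natAbs == (p.2 - q.2).natAbs)

-- _pair_conflicts: structural head-vs-rest recursion
def pvPairConflicts : List (Int × Int) → Int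
  | [] => 0
  | h :: rest =>
    (rest.map (fun r => if pvAtkB h r then (1 : Int) else 0)).sum + pvPairConflicts rest

def better_board_alt (problem : List (Int × Int)) : Option String :=
  let best := (PySem.List.pyRange 0 8 1).foldl (fun best x =>
    let others := PySem.List.slice problem none (some x) ++
                  PySem.List.slice problem (some (x + 1)) none
    let base := pvPairConflicts others
    (PySem.List.pyRange 0 8 1).foldl (fun best y =>
      let cost := base + (others.map (fun q => if pvAtkB (y, x) q then (1 : Int) else 0)).sum
      if (match best with | none => true | some t => cost < t.1)
      then some (cost, y, x) else best) best)
    (none : Option (Int × Int × Int))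
  match best with
  | none => none   -- unreachable: the scan always sets best
  | some (_, j, i) =>
    let queens := PySem.List.slice problem none (some i) ++ [(j, i)] ++
                  PySem.List.slice problem (some (i + 1)) none
    some (PySem.Str.join "\n" ((PySem.List.pyRange 0 8 1).map (fun r =>
      PySem.Str.join " " ((PySem.List.pyRange 0 8 1).map (fun c =>
        if (r, c) ∈ queens then "q" else ".")))))

-- ===== PRECONDITION & SPEC =====
def Spec_better_board (problem : List (Int × Int)) (out : Option String) : Prop := out = better_board_alt problem
instance (problem : List (Int × Int)) (out : Option String) : Decidable (Spec_better_board problem out) := by unfold Spec_better_board; infer_instance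

-- ===== CLAIM (what is proved, stated in full; the proofs are below) =====
def Claim_equal_better_board : Prop := ∀ (problem : List (Int × Int)), Dom_better_board problem → Spec_better_board problem (better_board problem)

-- ===== LEMMAS AND PROOFS =====

def pvCnt (e : Int × Int) (l : List (Int × Int)) : Int :=
  (l.map (fun q => if pvAtkB e q then (1 : Int) else 0)).sum

lemma pvAtk_symm (p q : Int × Int) : pvAtkB p q = pvAtkB q p := by
  unfold pvAtkB
  rw [Bool.beq_comm (a := p.1), Bool.beq_comm (a := p.2)]
  have h1 : (p.1 - q.1).natAbs = (q.1 - p.1).natAbs := by omega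
  have h2 : (p.2 - q.2).natAbs = (q.2 - p.2).natAbs := by omega
  rw [h1, h2]

lemma pvCnt_append (e : Int × Int) (l1 l2 : List (Int × Int)) :
    pvCnt e (l1 ++ l2) = pvCnt e l1 + pvCnt e l2 := by
  simp [pvCnt]

lemma pvPairConflicts_insert (e : Int × Int) :
    ∀ (l1 l2 : List (Int × Int)),
      pvPairConflicts (l1 ++ e :: l2) = pvPairConflicts (l1 ++ l2) + pvCnt e l1 + pvCnt e l2 := by
  intro l1
  induction l1 with
  | nil => intro l2; simp [pvPairConflicts, pvCnt]; ring
  | cons h t ih =>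
    intro l2
    simp only [List.cons_append, pvPairConflicts, List.map_append, List.sum_append,
      List.map_cons, List.sum_cons, ih, pvCnt, pvAtk_symm h e]
    ring

lemma pvMap_getD_range {α β : Type} (f : α → β) (d : α) :
    ∀ t : List α, (List.range t.length).map (fun m => f (t.getD m d)) = t.map f := by
  intro t
  induction t with
  | nil => simp
  | cons h t ih =>
    simp only [List.length_cons, List.range_succ_eq_map, List.map_cons, List.map_map]
    refine congrArg₂ _ rfl ?_
    simpa [Function.comp] using ih

-- pvPositionCost as a nested Nat-indexed sum over pairs k < k+1+m
def pvS (l : List (Int × Int)) : Int :=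
  ((List.range l.length).map (fun k =>
    ((List.range (l.length - (k + 1))).map (fun m =>
      if pvAtkB (l.getD k (0, 0)) (l.getD (k + 1 + m) (0, 0)) then (1 : Int) else 0)).sum)).sum

lemma pvS_eq_pairConflicts : ∀ l, pvS l = pvPairConflicts l := by
  intro l
  induction l with
  | nil => simp [pvS, pvPairConflicts]
  | cons h t ih =>
    unfold pvS at ih ⊢
    simp only [List.length_cons, List.range_succ_eq_map, List.map_cons, List.sum_cons,
      List.map_map]
    have hhead : (List.map (fun m => if pvAtkB ((h :: t).getD 0 (0, 0)) ((h :: t).getD (0 + 1 + m) (0, 0)) then (1:Int) else 0)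
          (List.range (t.length + 1 - (0 + 1)))).sum
        = (t.map (fun r => if pvAtkB h r then (1 : Int) else 0)).sum := by
      rw [← pvMap_getD_range (fun r => if pvAtkB h r then (1 : Int) else 0) ((0:Int),(0:Int)) t]
      simp [Nat.add_comm]
    have htail : (List.map
          ((fun k =>
              (List.map
                  (fun m => if pvAtkB ((h :: t).getD k (0, 0)) ((h :: t).getD (k + 1 + m) (0, 0)) then (1:Int) else 0)
                  (List.range (t.length + 1 - (k + 1)))).sum) ∘
            Nat.succ)
          (List.range t.length)).sum
        = (List.map
        (fun k =>
          (List.map (fun m => if pvAtkB (t.getD k (0, 0)) (t.getD (k + 1 + m) (0, 0)) then (1:Int) else 0)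
              (List.range (t.length - (k + 1)))).sum)
        (List.range t.length)).sum := by
      refine congrArg _ (List.map_congr_left ?_)
      intro k hk
      simp only [Function.comp, Nat.succ_eq_add_one]
      have h1 : t.length + 1 - (k + 1 + 1) = t.length - (k + 1) := by omega
      rw [h1]
      refine congrArg _ (List.map_congr_left ?_)
      intro m hm
      have h2 : k + 1 + 1 + m = (k + 1 + m) + 1 := by omega
      rw [h2, List.getD_cons_succ, List.getD_cons_succ]
    rw [hhead, htail, ih, pvPairConflicts]

lemma pvPositionCost_eq_pvS (l : List (Int × Int)) : pvPositionCost l = pvS l := by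
  unfold pvPositionCost pvS
  simp only [PySem.List.foldl_if_add_one, PySem.List.foldl_add,
    PySem.List.sum_map_ite_one_zero, PySem.List.pyRange_one]
  simp only [List.map_map, zero_add, Int.sub_zero, Int.toNat_natCast]
  refine congrArg _ (List.map_congr_left ?_)
  intro k hk
  simp only [Function.comp]
  have h1 : ((k : Int) + 1) = ((k + 1 : Nat) : Int) := by push_cast; ring
  rw [h1, Int.toNat_sub]
  rw [List.countP_map]
  refine congrArg _ (List.countP_congr ?_)
  intro m hm
  simp only [Function.comp]
  have e1 : ((k + 1 : Nat) : Int) + (m : Int) = ((k + 1 + m : Nat) : Int) := by omega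
  have e2 : (k : Int) + 1 + (m : Int) = ((k + 1 + m : Nat) : Int) := by omega
  simp only [e1, PySem.List.pyGetD_natCast, List.getD_eq_getElem?_getD, pvAtkB]

lemma pvPC_eq (l : List (Int × Int)) : pvPositionCost l = pvPairConflicts l := by
  rw [pvPositionCost_eq_pvS, pvS_eq_pairConflicts]

-- the central cost identity: inserting e into the other queens
lemma pvCostEq (e : Int × Int) (l1 l2 : List (Int × Int)) :
    pvPositionCost (l1 ++ e :: l2) = pvPairConflicts (l1 ++ l2) + pvCnt e (l1 ++ l2) := by
  rw [pvPC_eq, pvPairConflicts_insert, pvCnt_append]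
  ring

-- ============ the board fill ============

def pvF (p : List (Int × Int)) (y x : Int) : Int :=
  pvPositionCost (PySem.List.slice p none (some x) ++ [(y, x)] ++
                  PySem.List.slice p (some (x + 1)) none)

def pvZeroBoard : List (List Int) :=
  (PySem.List.pyRange 0 8 1).foldl (fun b _ =>
    b ++ [(PySem.List.pyRange 0 8 1).foldl (fun r _ => r ++ [(0 : Int)]) []]) []

def pvGetCell (b : List (List Int)) (j i : Int) : Int :=
  PySem.List.pyGetD (PySem.List.pyGetD b j []) i 0

def pvUpd (b : List (List Int)) (y x : Int) (v : Int) : List (List Int) :=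
  PySem.List.pySetD b y (PySem.List.pySetD (PySem.List.pyGetD b y []) x v)

def pvShaped (b : List (List Int)) : Prop :=
  b.length = 8 ∧ ∀ r ∈ b, r.length = 8

lemma pvZeroBoard_shaped : pvShaped pvZeroBoard := by
  constructor <;> decide

lemma pvShaped_upd {b : List (List Int)} (hb : pvShaped b) {y : Int} (x : Int) (v : Int)
    (hy0 : 0 ≤ y) (hy : y < 8) :
    pvShaped (pvUpd b y x v) := by
  obtain ⟨hl, hr⟩ := hb
  have hylen : y.toNat < b.length := by omega
  unfold pvUpd pvShaped
  rw [PySem.List.pySetD_of_nonneg _ _ hy0]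
  constructor
  · simp [hl]
  · intro r hrm
    rcases List.mem_or_eq_of_mem_set hrm with hmem | hset
    · exact hr r hmem
    · subst hset
      rw [PySem.List.length_pySetD, PySem.List.pyGetD_eq_getElem _ _ hy0 (by omega)]
      exact hr _ (List.getElem_mem hylen)

lemma pvGetCell_upd {b : List (List Int)} (hb : pvShaped b) {y x j i : Int} (v : Int)
    (hy0 : 0 ≤ y) (hy : y < 8) (hx0 : 0 ≤ x) (hx : x < 8)
    (hj0 : 0 ≤ j) (hj : j < 8) (hi0 : 0 ≤ i) (hi : i < 8) :
    pvGetCell (pvUpd b y x v) j i = if j = y ∧ i = x then v else pvGetCell b j i := by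
  obtain ⟨hl, hr⟩ := hb
  have hylen : y.toNat < b.length := by omega
  have hjlen : j.toNat < b.length := by omega
  have hrowy : PySem.List.pyGetD b y ([] : List Int) = b[y.toNat] :=
    PySem.List.pyGetD_eq_getElem _ _ hy0 (by omega)
  have hrowylen : (b[y.toNat] : List Int).length = 8 := hr _ (List.getElem_mem hylen)
  unfold pvUpd pvGetCell
  rw [PySem.List.pySetD_of_nonneg _ _ hy0, hrowy, PySem.List.pySetD_of_nonneg _ _ hx0]
  have houter : PySem.List.pyGetD (b.set y.toNat ((b[y.toNat] : List Int).set x.toNat v)) j ([] : List Int)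
      = (b.set y.toNat ((b[y.toNat] : List Int).set x.toNat v))[j.toNat]'(by simp; omega) :=
    PySem.List.pyGetD_eq_getElem _ _ hj0 (by simp; omega)
  rw [houter, List.getElem_set]
  by_cases hjy : j = y
  · subst hjy
    rw [if_pos (by omega : j.toNat = j.toNat)]
    have hinner : PySem.List.pyGetD ((b[j.toNat] : List Int).set x.toNat v) i (0 : Int)
        = ((b[j.toNat] : List Int).set x.toNat v)[i.toNat]'(by simp [hrowylen]; omega) :=
      PySem.List.pyGetD_eq_getElem _ _ hi0 (by simp [hrowylen]; omega)
    rw [hinner, List.getElem_set]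
    by_cases hix : i = x
    · subst hix
      simp
    · have hxi' : ¬ x.toNat = i.toNat := by omega
      rw [if_neg hxi', if_neg (by rintro ⟨_, hb2⟩; exact hix hb2)]
      have h1 : PySem.List.pyGetD b j ([] : List Int) = b[j.toNat] :=
        PySem.List.pyGetD_eq_getElem _ _ hj0 (by omega)
      have h2 : PySem.List.pyGetD (b[j.toNat] : List Int) i (0 : Int) = (b[j.toNat] : List Int)[i.toNat]'(by rw [hr _ (List.getElem_mem hjlen)]; omega) :=
        PySem.List.pyGetD_eq_getElem _ _ hi0 (by rw [hr _ (List.getElem_mem hjlen)]; omega)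
      rw [h1, h2]
  · have hjy' : ¬ y.toNat = j.toNat := by omega
    rw [if_neg hjy', if_neg (by rintro ⟨hb1, _⟩; exact hjy hb1)]
    have h1 : PySem.List.pyGetD b j ([] : List Int) = b[j.toNat] :=
      PySem.List.pyGetD_eq_getElem _ _ hj0 (by omega)
    rw [h1]

lemma pvFoldlNested {α β γ : Type} (xs : List α) (ys : List β) (g : γ → α → β → γ) :
    ∀ b0 : γ, xs.foldl (fun b x => ys.foldl (fun b y => g b x y) b) b0 =
      (xs.flatMap fun x => ys.map fun y => (x, y)).foldl (fun b xy => g b xy.1 xy.2) b0 := by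
  induction xs with
  | nil => intro b0; simp
  | cons x xs ih =>
    intro b0
    simp only [List.foldl_cons, List.flatMap_cons, List.foldl_append, List.foldl_map, ih]

lemma pvFillRead (f : Int → Int → Int) :
    ∀ (cs : List (Int × Int)) (b : List (List Int)), pvShaped b →
      (∀ c ∈ cs, 0 ≤ c.1 ∧ c.1 < 8 ∧ 0 ≤ c.2 ∧ c.2 < 8) →
      ∀ j i : Int, 0 ≤ j → j < 8 → 0 ≤ i → i < 8 →
        pvGetCell (cs.foldl (fun b c => pvUpd b c.2 c.1 (f c.2 c.1)) b) j i =
          if (i, j) ∈ cs then f j i else pvGetCell b j i := by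
  intro cs
  induction cs with
  | nil => intro b hb _ j i _ _ _ _; simp
  | cons c cs ih =>
    intro b hb hcs j i hj0 hj hi0 hi
    obtain ⟨hc1, hc2, hc3, hc4⟩ := hcs c (by simp)
    rw [List.foldl_cons, ih _ (pvShaped_upd hb _ _ hc3 hc4) (fun d hd => hcs d (by simp [hd])) j i hj0 hj hi0 hi,
      pvGetCell_upd hb _ hc3 hc4 hc1 hc2 hj0 hj hi0 hi]
    by_cases hmem : (i, j) ∈ cs
    · simp [hmem]
    · by_cases heq : (i, j) = c
      · have r1 : j = c.2 := by rw [← heq]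
        have r2 : i = c.1 := by rw [← heq]
        simp [r1, r2]
      · have hne : ¬ (j = c.2 ∧ i = c.1) := by
          rintro ⟨r1, r2⟩; exact heq (by rw [r1, r2])
        simp [hmem, heq, hne]

lemma pvBoard_cell (p : List (Int × Int)) (j i : Int)
    (hj0 : 0 ≤ j) (hj : j < 8) (hi0 : 0 ≤ i) (hi : i < 8) :
    pvGetCell (pvNumberOfAttacks p) j i =
      pvPositionCost (PySem.List.slice p none (some i) ++ [(j, i)] ++
                      PySem.List.slice p (some (i + 1)) none) := by
  have h1 : pvNumberOfAttacks p =
      (PySem.List.pyRange 0 8 1).foldl (fun b x =>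
        (PySem.List.pyRange 0 8 1).foldl (fun b y => pvUpd b y x (pvF p y x)) b) pvZeroBoard := rfl
  rw [h1, pvFoldlNested (g := fun b x y => pvUpd b y x (pvF p y x))]
  rw [pvFillRead (fun y x => pvF p y x) _ _ pvZeroBoard_shaped ?hb j i hj0 hj hi0 hi]
  case hb =>
    intro c hc
    simp only [List.mem_flatMap, List.mem_map, PySem.List.mem_pyRange_one] at hc
    obtain ⟨x, hx, y, hy, rfl⟩ := hc
    exact ⟨hx.1, hx.2, hy.1, hy.2⟩
  have hmem : ((i, j) : Int × Int) ∈ (PySem.List.pyRange 0 8 1).flatMap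
      (fun x => (PySem.List.pyRange 0 8 1).map fun y => (x, y)) := by
    simp only [List.mem_flatMap, List.mem_map, PySem.List.mem_pyRange_one]
    exact ⟨i, ⟨hi0, hi⟩, j, ⟨hj0, hj⟩, rfl⟩
  rw [if_pos hmem]
  rfl

-- ============ the min scan ============

def pvRel (s : Option Int × Option (Int × Int)) (b : Option (Int × Int × Int)) : Prop :=
  (s = (none, none) ∧ b = none) ∨ ∃ c j i, s = (some c, some (j, i)) ∧ b = some (c, j, i)

lemma pvScanInner (f g : Int → Int) (x : Int) :
    ∀ (ys : List Int), (∀ y ∈ ys, f y = g y) → ∀ s b, pvRel s b →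
      pvRel (ys.foldl (fun st j =>
              if (match st.1 with | none => true | some m => f j < m)
              then (some (f j), some (j, x)) else st) s)
            (ys.foldl (fun best y =>
              if (match best with | none => true | some t => g y < t.1)
              then some (g y, y, x) else best) b) := by
  intro ys
  induction ys with
  | nil => intro _ s b h; exact h
  | cons y ys ih =>
    intro hys s b h
    simp only [List.foldl_cons]
    apply ih (fun z hz => hys z (by simp [hz]))
    have hy : f y = g y := hys y (by simp)
    rcases h with ⟨h1, h2⟩ | ⟨c, j, i, h1, h2⟩
    · subst h2; rw [h1]
      right
      exact ⟨f y, y, x, by simp, by simp [hy]⟩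
    · subst h2; rw [h1]
      simp only [hy]
      by_cases hc : g y < c
      · simp only [hc]
        right; exact ⟨g y, y, x, rfl, rfl⟩
      · simp only [hc]
        right; exact ⟨c, j, i, rfl, rfl⟩

lemma pvScanOuter (F G : Int → Int → Int)
    (hFG : ∀ x y, 0 ≤ x → x < 8 → 0 ≤ y → y < 8 → F x y = G x y) :
    ∀ (xs : List Int), (∀ x ∈ xs, 0 ≤ x ∧ x < 8) → ∀ s b, pvRel s b →
      pvRel (xs.foldl (fun st i =>
              (PySem.List.pyRange 0 8 1).foldl (fun st j =>
                if (match st.1 with | none => true | some m => F i j < m)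
                then (some (F i j), some (j, i)) else st) st) s)
            (xs.foldl (fun best x =>
              (PySem.List.pyRange 0 8 1).foldl (fun best y =>
                if (match best with | none => true | some t => G x y < t.1)
                then some (G x y, y, x) else best) best) b) := by
  intro xs
  induction xs with
  | nil => intro _ s b h; exact h
  | cons x xs ih =>
    intro hxs s b h
    simp only [List.foldl_cons]
    apply ih (fun z hz => hxs z (by simp [hz]))
    obtain ⟨hx0, hx8⟩ := hxs x (by simp)
    exact pvScanInner (F x) (G x) x _
      (fun y hy => by
        rw [PySem.List.mem_pyRange_one] at hy
        exact hFG x y hx0 hx8 hy.1 hy.2) s b h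

-- ============ the rendering ============

lemma pvStripWrap (Y : List Char)
    (hh : Y.head?.any (fun a => !PySem.Chars.isspace a))
    (hl : Y.getLast?.any (fun a => !PySem.Chars.isspace a)) :
    PySem.Chars.strip (Y ++ ['\n']) = Y := by
  cases hY : Y with
  | nil => rw [hY] at hh; simp at hh
  | cons a t =>
    have hYne : Y ≠ [] := by rw [hY]; simp
    have ha : PySem.Chars.isspace a = false := by
      rw [hY] at hh; simpa using hh
    have hg : PySem.Chars.isspace (Y.getLast hYne) = false := by
      rw [List.getLast?_eq_some_getLast hYne] at hl; simpa using hl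
    have hlstrip : PySem.Chars.lstrip (Y ++ ['\n']) = Y ++ ['\n'] := by
      rw [hY]
      simp [PySem.Chars.lstrip, ha]
    have hrev : (Y ++ ['\n']).reverse = '\n' :: (Y.getLast hYne :: Y.dropLast.reverse) := by
      conv_lhs => rw [← List.dropLast_append_getLast hYne]
      simp [List.reverse_append]
    rw [← hY]
    show PySem.Chars.rstrip (PySem.Chars.lstrip (Y ++ ['\n'])) = Y
    rw [hlstrip]
    show (List.dropWhile PySem.Chars.isspace (Y ++ ['\n']).reverse).reverse = Y
    rw [hrev]
    rw [List.dropWhile_cons_of_pos (by rfl), List.dropWhile_cons_of_neg (by simp [hg])]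
    rw [List.reverse_cons, List.reverse_reverse]
    exact List.dropLast_append_getLast hYne

lemma pvStripJoin (r0 r1 r2 r3 r4 r5 r6 r7 : List Char)
    (h0 : (r0.head?).any (fun a => !PySem.Chars.isspace a))
    (h7 : (r7.getLast?).any (fun a => !PySem.Chars.isspace a)) :
    PySem.Chars.strip
      (((((((((((((((([] ++ r0) ++ ['\n']) ++ r1) ++ ['\n']) ++ r2) ++ ['\n']) ++ r3) ++ ['\n']) ++ r4) ++ ['\n']) ++ r5) ++ ['\n']) ++ r6) ++ ['\n']) ++ r7) ++ ['\n'])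
      = PySem.Chars.join ['\n'] [r0, r1, r2, r3, r4, r5, r6, r7] := by
  have h7ne : r7 ≠ [] := by cases r7 <;> simp_all
  have harg : (((((((((((((((([] ++ r0) ++ ['\n']) ++ r1) ++ ['\n']) ++ r2) ++ ['\n']) ++ r3) ++ ['\n']) ++ r4) ++ ['\n']) ++ r5) ++ ['\n']) ++ r6) ++ ['\n']) ++ r7) : List Char)
      = PySem.Chars.join ['\n'] [r0, r1, r2, r3, r4, r5, r6, r7] := by
    simp [PySem.Chars.join, List.intercalate, List.append_assoc]
  rw [List.nil_append] at harg ⊢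
  rw [harg]
  apply pvStripWrap
  · rw [← harg]
    cases r0 with
    | nil => simp at h0
    | cons a t => simpa using h0
  · rw [← harg]
    have hgl : ((((((((((((((r0 ++ ['\n']) ++ r1) ++ ['\n']) ++ r2) ++ ['\n']) ++ r3) ++ ['\n']) ++ r4) ++ ['\n']) ++ r5) ++ ['\n']) ++ r6) ++ ['\n']) ++ r7).getLast? = r7.getLast? := by
      rw [List.getLast?_append_of_ne_nil _ h7ne]
    rw [hgl]
    exact h7

lemma pvToListIte (P : Prop) [Decidable P] :
    (if P then ("q" : String) else ".").toList = [if P then 'q' else '.'] := by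
  split <;> rfl

lemma pvToListEmpty : ("" : String).toList = [] := rfl
lemma pvToListNl : ("\n" : String).toList = ['\n'] := rfl
lemma pvToListSp : (" " : String).toList = [' '] := rfl

lemma pvChNotSpace (P : Prop) [Decidable P] :
    PySem.Chars.isspace (if P then 'q' else '.') = false := by
  split <;> rfl

lemma pvRenderEq (q : List (Int × Int)) :
    PySem.Str.strip (((PySem.List.pyRange 0 8 1).foldl (fun sol row =>
        sol ++ [(PySem.List.pyRange 0 8 1).foldl (fun cur col =>
          cur ++ [if (row, col) ∈ q then "q" else "."]) []]) []).foldl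
        (fun out row => out ++ PySem.Str.join " " row ++ "\n") "")
      = PySem.Str.join "\n" ((PySem.List.pyRange 0 8 1).map (fun r =>
          PySem.Str.join " " ((PySem.List.pyRange 0 8 1).map (fun c =>
            if (r, c) ∈ q then "q" else ".")))) := by
  have hr8 : PySem.List.pyRange 0 8 1 = [0, 1, 2, 3, 4, 5, 6, 7] := rfl
  simp only [PySem.List.foldl_append_singleton_eq_map, List.nil_append, List.foldl_map]
  rw [hr8]
  simp only [List.map_cons, List.map_nil, List.foldl_cons, List.foldl_nil]
  simp only [PySem.Str.strip, PySem.Str.join]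
  refine congrArg String.ofList ?_
  simp only [String.toList_append, String.toList_ofList,
    pvToListIte, pvToListEmpty, pvToListNl, pvToListSp,
    List.map_cons, List.map_nil]
  rw [pvStripJoin]
  · simp [PySem.Chars.join, List.intercalate, pvChNotSpace]
  · simp [PySem.Chars.join, List.intercalate, pvChNotSpace]

lemma pvCellCost (p : List (Int × Int)) (x y : Int)
    (hx0 : 0 ≤ x) (hx : x < 8) (hy0 : 0 ≤ y) (hy : y < 8) :
    PySem.List.pyGetD (PySem.List.pyGetD (pvNumberOfAttacks p) y []) x 0 =
      pvPairConflicts (PySem.List.slice p none (some x) ++ PySem.List.slice p (some (x + 1)) none) +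
      ((PySem.List.slice p none (some x) ++ PySem.List.slice p (some (x + 1)) none).map
        (fun q => if pvAtkB (y, x) q then (1 : Int) else 0)).sum := by
  have h := pvBoard_cell p y x hy0 hy hx0 hx
  show pvGetCell (pvNumberOfAttacks p) y x = _
  rw [h, List.append_assoc, List.singleton_append, pvCostEq]
  rfl

-- the two scans stay related: same costs, same column-major strict-minimum order
lemma pvScansRel (p : List (Int × Int)) :
    pvRel ((PySem.List.pyRange 0 8 1).foldl (fun st i =>
        (PySem.List.pyRange 0 8 1).foldl (fun st j =>
          if (match st.1 with
              | none => true
              | some m => PySem.List.pyGetD (PySem.List.pyGetD (pvNumberOfAttacks p) j []) i 0 < m)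
          then (some (PySem.List.pyGetD (PySem.List.pyGetD (pvNumberOfAttacks p) j []) i 0), some (j, i))
          else st) st)
        ((none : Option Int), (none : Option (Int × Int))))
      ((PySem.List.pyRange 0 8 1).foldl (fun best x =>
        (PySem.List.pyRange 0 8 1).foldl (fun best y =>
          if (match best with
              | none => true
              | some t => pvPairConflicts (PySem.List.slice p none (some x) ++ PySem.List.slice p (some (x + 1)) none) +
            ((PySem.List.slice p none (some x) ++ PySem.List.slice p (some (x + 1)) none).map
              (fun q => if pvAtkB (y, x) q then (1 : Int) else 0)).sum < t.1)
          then some (pvPairConflicts (PySem.List.slice p none (some x) ++ PySem.List.slice p (some (x + 1)) none) +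
            ((PySem.List.slice p none (some x) ++ PySem.List.slice p (some (x + 1)) none).map
              (fun q => if pvAtkB (y, x) q then (1 : Int) else 0)).sum, y, x)
          else best) best)
        (none : Option (Int × Int × Int))) := by
  apply pvScanOuter
  · intro x y hx0 hx hy0 hy
    exact pvCellCost p x y hx0 hx hy0 hy
  · intro x hx
    rw [PySem.List.mem_pyRange_one] at hx
    exact hx
  · exact Or.inl ⟨rfl, rfl⟩

-- ===== VERDICT (by name: the statement is the Claim_ definition above) =====
set_option maxRecDepth 8192 in
set_option maxHeartbeats 1000000 in
theorem better_board_spec : Claim_equal_better_board := by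
  intro problem _
  show better_board problem = better_board_alt problem
  unfold better_board better_board_alt
  simp only []
  rcases pvScansRel problem with ⟨h1, h2⟩ | ⟨c, j, i, h1, h2⟩
  · rw [h1, h2]
  · rw [h1, h2]
    exact congrArg some (pvRenderEq _)
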